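-- pv_equiv track=rewrite | github.com/MonishaEswaramurhy/multilingual-doubt-solver-and-quiz-portal | app/translator.py | get_language_family
-- ===== SOURCE A (Python) =====
-- def get_language_family(code: str) -> str:
--     """Get language family for better translation grouping"""
--     language_families = {
--         'indo-aryan': ['hi', 'bn', 'mr', 'gu', 'pa', 'ur'],
--         'dravidian': ['ta', 'te', 'ml', 'kn'],
--         'romance': ['es', 'fr', 'it', 'pt', 'ro'],
--         'germanic': ['en', 'de', 'nl', 'sv', 'no', 'da'],
--         'slavic': ['ru', 'uk', 'cs', 'pl', 'bg', 'hr', 'sk', 'sl'],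
--         'semitic': ['ar', 'he'],
--         'sino-tibetan': ['zh', 'th'],
--         'japonic': ['ja'],
--         'koreanic': ['ko'],
--         'turkic': ['tr'],
--         'finnic': ['fi', 'et'],
--         'baltic': ['lv', 'lt'],
--         'celtic': ['ga', 'cy'],
--         'uralic': ['hu']
--     }
--
--     for family, languages in language_families.items():
--         if code in languages:
--             return family
--
--     return 'other'
-- ===== SOURCE B (Python) =====
-- # Compact table "codes:family;..." parsed once at import into a flat
-- # reverse-lookup dict, so each call is a single dict lookup.
-- _TABLE = (
--     "hi bn mr gu pa ur:indo-aryan;"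
--     "ta te ml kn:dravidian;"
--     "es fr it pt ro:romance;"
--     "en de nl sv no da:germanic;"
--     "ru uk cs pl bg hr sk sl:slavic;"
--     "ar he:semitic;"
--     "zh th:sino-tibetan;"
--     "ja:japonic;"
--     "ko:koreanic;"
--     "tr:turkic;"
--     "fi et:finnic;"
--     "lv lt:baltic;"
--     "ga cy:celtic;"
--     "hu:uralic"
-- )
--
-- _FAMILY_OF = {}
-- for _entry in _TABLE.split(';'):
--     _codes, _family = _entry.split(':')
--     for _c in _codes.split():
--         _FAMILY_OF[_c] = _family
--
--
-- def get_language_family(code: str) -> str: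
--     """Get language family for better translation grouping"""
--     return _FAMILY_OF.get(code, 'other')
-- ===== Notes on version B (the rewrite author's own statement) =====
-- stated objective: idiomatic
-- what changed: Replaces the per-call scan over a dict of families (inner membership test per family) by a compact one-string table parsed once at module load into a flat reverse-lookup dict, so each call is a single lookup with the same default for unknown codes.
import Mathlib
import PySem

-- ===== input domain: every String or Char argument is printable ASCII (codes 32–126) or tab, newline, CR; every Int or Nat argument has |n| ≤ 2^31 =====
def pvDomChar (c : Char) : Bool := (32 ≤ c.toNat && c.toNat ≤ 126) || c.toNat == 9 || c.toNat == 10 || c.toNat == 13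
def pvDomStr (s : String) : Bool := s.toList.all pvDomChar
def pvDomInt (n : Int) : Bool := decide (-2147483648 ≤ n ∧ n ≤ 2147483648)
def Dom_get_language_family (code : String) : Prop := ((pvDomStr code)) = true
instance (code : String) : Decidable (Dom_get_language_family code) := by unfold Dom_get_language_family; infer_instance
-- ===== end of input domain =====

-- B replaces A's per-call scan over a dict of families by a compact one-string table
-- parsed once into a flat reverse-lookup dict, each call being a single lookup (idiomatic).

-- ===== PORT A =====
-- A's local dict literal of families (insertion order preserved).
def pvFamiliesA : List (String × List String) :=
  [("indo-aryan", ["hi", "bn", "mr", "gu", "pa", "ur"]),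
   ("dravidian", ["ta", "te", "ml", "kn"]),
   ("romance", ["es", "fr", "it", "pt", "ro"]),
   ("germanic", ["en", "de", "nl", "sv", "no", "da"]),
   ("slavic", ["ru", "uk", "cs", "pl", "bg", "hr", "sk", "sl"]),
   ("semitic", ["ar", "he"]),
   ("sino-tibetan", ["zh", "th"]),
   ("japonic", ["ja"]),
   ("koreanic", ["ko"]),
   ("turkic", ["tr"]),
   ("finnic", ["fi", "et"]),
   ("baltic", ["lv", "lt"]),
   ("celtic", ["ga", "cy"]),
   ("uralic", ["hu"])]

-- the 'for family, languages in ….items(): if code in languages: return family' loop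
def pvFamLoop (code : String) : List (String × List String) → String
  | [] => "other"
  | (fam, langs) :: rest => if code ∈ langs then fam else pvFamLoop code rest

def get_language_family (code : String) : String :=
  pvFamLoop code pvFamiliesA

-- ===== PORT B =====
-- B's module-level compact table string.
def pvTable : String :=
  "hi bn mr gu pa ur:indo-aryan;ta te ml kn:dravidian;es fr it pt ro:romance;en de nl sv no da:germanic;ru uk cs pl bg hr sk sl:slavic;ar he:semitic;zh th:sino-tibetan;ja:japonic;ko:koreanic;tr:turkic;fi et:finnic;lv lt:baltic;ga cy:celtic;hu:uralic"

-- the module-load parsing loop: for entry in _TABLE.split(';'): codes, family = entry.split(':');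
-- for c in codes.split(): _FAMILY_OF[c] = family.  (The unpack 'codes, family = …' always
-- matches two pieces on this literal; the wildcard arm only makes the match total.)
-- str.split(sep) with the nonempty literal seps ';' and ':' — split? is always 'some' there,
-- the getD [] only makes it total.
def pvSplit (s sep : String) : List String := (PySem.Str.split? s sep).getD []

def pvFamilyOf : PySem.Dict String String :=
  (pvSplit pvTable ";").foldl
    (fun d entry =>
      match pvSplit entry ":" with
      | [codes, family] => (PySem.Str.split₀ codes).foldl (fun d c => d.insert c family) d
      | _ => d)
    PySem.Dict.empty

def get_language_family_alt (code : String) : String :=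
  pvFamilyOf.getD code "other"

-- ===== PRECONDITION & SPEC =====
def Spec_get_language_family (code : String) (out : String) : Prop := out = get_language_family_alt code
instance (code : String) (out : String) : Decidable (Spec_get_language_family code out) := by unfold Spec_get_language_family; infer_instance

-- ===== CLAIM (what is proved, stated in full; the proofs are below) =====
def Claim_equal_get_language_family : Prop := ∀ (code : String), Dom_get_language_family code → Spec_get_language_family code (get_language_family code)

-- ===== LEMMAS AND PROOFS =====

-- first-match lookup on the flattened (code, family) pairs is exactly A's family loop
theorem pvFamLoop_eq_flat_lookup (fams : List (String × List String)) (code : String) :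
    pvFamLoop code fams
      = (PySem.Dict.mk (fams.flatMap (fun p => p.2.map (fun c => (c, p.1))))).getD code "other" := by
  induction fams with
  | nil => simp [pvFamLoop, PySem.Dict.getD_eq_get?_getD, PySem.Dict.get?]
  | cons hd tl ih =>
    obtain ⟨fam, langs⟩ := hd
    simp only [pvFamLoop, List.flatMap_cons]
    induction langs with
    | nil => simpa using ih
    | cons c cs ihc =>
      simp only [List.map_cons, List.cons_append,
        PySem.Dict.getD_eq_get?_getD, PySem.Dict.get?_mk_cons]
      by_cases h : code = c
      · simp [h]
      · have hb : (c == code) = false := by simp; exact fun e => h e.symm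
        simp only [hb, Bool.false_eq_true, if_false]
        have := ihc
        simp only [List.mem_cons, PySem.Dict.getD_eq_get?_getD] at this ⊢
        simpa [h] using this

-- B's parse-and-insert of the table computes exactly the flattened association list of A's table
theorem pvFamilyOf_eq_flat :
    pvFamilyOf = PySem.Dict.mk (pvFamiliesA.flatMap (fun p => p.2.map (fun c => (c, p.1)))) := by
  set_option maxRecDepth 8192 in decide

-- ===== VERDICT (by name: the statement is the Claim_ definition above) =====
theorem get_language_family_spec : Claim_equal_get_language_family := by
  intro code _
  unfold Spec_get_language_family get_language_family get_language_family_alt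
  rw [pvFamilyOf_eq_flat]
  exact pvFamLoop_eq_flat_lookup pvFamiliesA code
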